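-- pv_equiv track=rewrite | github.com/ebanner/advent-of-code-leaderboard | collaborative-leaderboard/main.py | get_stars
-- ===== SOURCE A (Python) =====
-- CURRENT_DAY = 11
--
-- def get_stars(leaderboard, members):
--     stars = {}
--     for day in range(1, CURRENT_DAY+1):
--         day = str(day)
--         stars[day] = {'gold': 0, 'silver': 0}
--         for member in members:
--             day_progress = members[member]['completion_day_level'].get(day, {})
--             if '1' in day_progress and '2' in day_progress:
--                 stars[day]['gold'] += 1
--             elif '1' in day_progress:
--                 stars[day]['silver'] += 1
--             else:
--                 pass
--
--     return stars
-- ===== SOURCE B (Python) =====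
-- CURRENT_DAY = 11
--
-- def get_stars(leaderboard, members):
--     stars = {str(d): {'gold': 0, 'silver': 0} for d in range(1, CURRENT_DAY + 1)}
--     for member in members.values():
--         for day, progress in member['completion_day_level'].items():
--             if day in stars and '1' in progress:
--                 stars[day]['gold' if '2' in progress else 'silver'] += 1
--     return stars
-- ===== Notes on version B (the rewrite author's own statement) =====
-- stated objective: simpler
-- what changed: A scans the full day-by-member grid (for each day 1..11, probe every member's completion_day_level with .get); B builds the zeroed day table once and makes a single member-major pass over only the (day, progress) items each member actually completed, skipping days outside the table.
import Mathlib
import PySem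

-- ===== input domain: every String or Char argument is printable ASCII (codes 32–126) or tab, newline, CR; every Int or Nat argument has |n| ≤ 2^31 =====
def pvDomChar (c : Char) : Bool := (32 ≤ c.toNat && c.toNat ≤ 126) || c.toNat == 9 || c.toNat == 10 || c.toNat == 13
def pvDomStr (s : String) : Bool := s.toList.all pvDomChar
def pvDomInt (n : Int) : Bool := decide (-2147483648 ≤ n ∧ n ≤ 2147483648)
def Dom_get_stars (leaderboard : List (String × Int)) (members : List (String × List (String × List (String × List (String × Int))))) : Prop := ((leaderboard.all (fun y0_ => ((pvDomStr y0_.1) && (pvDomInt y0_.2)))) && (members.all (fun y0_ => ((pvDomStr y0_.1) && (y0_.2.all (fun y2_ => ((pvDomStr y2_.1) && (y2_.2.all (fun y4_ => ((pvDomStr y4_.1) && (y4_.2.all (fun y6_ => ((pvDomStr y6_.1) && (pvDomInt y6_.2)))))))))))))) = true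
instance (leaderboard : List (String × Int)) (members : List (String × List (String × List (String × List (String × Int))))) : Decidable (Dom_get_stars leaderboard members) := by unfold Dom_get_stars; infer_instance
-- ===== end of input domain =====

-- B swaps A's day-major grid scan (for each day 1..11, probe every member with .get)
-- for a member-major pass over only the days each member actually completed; return
-- values proved equal, same gold/silver rule, same zeroed defaults and key order.

-- marshalling of the dict-typed `members` argument (Python dict ≙ assoc list; dict(pairs) = PySem.Dict.ofList)
def pvMembersDict (members : List (String × List (String × List (String × List (String × Int))))) :
    PySem.Dict String (PySem.Dict String (PySem.Dict String (PySem.Dict String Int))) :=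
  PySem.Dict.ofList (members.map (fun m =>
    (m.1, PySem.Dict.ofList (m.2.map (fun a =>
      (a.1, PySem.Dict.ofList (a.2.map (fun q => (q.1, PySem.Dict.ofList q.2)))))))))

-- ===== PORT A =====
-- literal port: for day in range(1, 11+1): stars[day] = zeros; for member in members: .get chain, gold/silver/neither
def get_stars (leaderboard : List (String × Int)) (members : List (String × List (String × List (String × List (String × Int))))) : List (String × List (String × Int)) :=
  (((PySem.List.pyRange 1 (11 + 1) 1).foldl
    (fun stars dayI =>
      ((pvMembersDict members).keys).foldl
        (fun stars member =>
          let day_progress :=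
            (((pvMembersDict members).getD member PySem.Dict.empty).getD "completion_day_level" PySem.Dict.empty).getD (PySem.Int.toStr dayI) PySem.Dict.empty
          if day_progress.contains "1" && day_progress.contains "2" then
            stars.modify (PySem.Int.toStr dayI) PySem.Dict.empty (fun d => d.modify "gold" 0 (· + 1))
          else if day_progress.contains "1" then
            stars.modify (PySem.Int.toStr dayI) PySem.Dict.empty (fun d => d.modify "silver" 0 (· + 1))
          else stars)
        (stars.insert (PySem.Int.toStr dayI) (PySem.Dict.ofList [("gold", (0 : Int)), ("silver", 0)])))
    PySem.Dict.empty).items).map (fun p => (p.1, p.2.items))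

-- ===== PORT B =====
-- literal port of Source B: zero-initialised table, then one pass over members.values() and the items of each completion_day_level
def get_stars_alt (leaderboard : List (String × Int)) (members : List (String × List (String × List (String × List (String × Int))))) : List (String × List (String × Int)) :=
  ((((pvMembersDict members).values).foldl
    (fun stars member =>
      ((member.getD "completion_day_level" PySem.Dict.empty).items).foldl
        (fun stars dp =>
          if stars.contains dp.1 && dp.2.contains "1" then
            stars.modify dp.1 PySem.Dict.empty
              (fun d => d.modify (if dp.2.contains "2" then "gold" else "silver") 0 (· + 1))
          else stars)
        stars)
    ((PySem.List.pyRange 1 (11 + 1) 1).foldl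
      (fun d dayI => d.insert (PySem.Int.toStr dayI) (PySem.Dict.ofList [("gold", (0 : Int)), ("silver", 0)]))
      PySem.Dict.empty)).items).map (fun p => (p.1, p.2.items))

-- ===== PRECONDITION & SPEC =====
-- Pre_ excludes exactly the inputs where Python A raises KeyError: some member record
-- (after dict collapsing) has no 'completion_day_level' key; B raises the same KeyError there.
def Pre_get_stars (leaderboard : List (String × Int)) (members : List (String × List (String × List (String × List (String × Int))))) : Prop :=
  ((PySem.Dict.ofList (members.map (fun m => (m.1, PySem.Dict.ofList m.2)))).values.all
    (fun m => m.contains "completion_day_level")) = true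
instance (leaderboard : List (String × Int)) (members : List (String × List (String × List (String × List (String × Int))))) : Decidable (Pre_get_stars leaderboard members) := by unfold Pre_get_stars; infer_instance

def pvWitness_get_stars : (List (String × Int)) × (List (String × List (String × List (String × List (String × Int))))) :=
  ([("x", 1)], [("alice", [("completion_day_level", [("1", [("1", 1), ("2", 1)]), ("3", [("1", 1)])])]),
                ("bob", [("completion_day_level", [("2", [("2", 1)])])])])

def Spec_get_stars (leaderboard : List (String × Int)) (members : List (String × List (String × List (String × List (String × Int))))) (out : List (String × List (String × Int))) : Prop := out = get_stars_alt leaderboard members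
instance (leaderboard : List (String × Int)) (members : List (String × List (String × List (String × List (String × Int))))) (out : List (String × List (String × Int))) : Decidable (Spec_get_stars leaderboard members out) := by unfold Spec_get_stars; infer_instance

-- ===== CLAIM (what is proved, stated in full; the proofs are below) =====
def Claim_equal_get_stars : Prop := ∀ (leaderboard : List (String × Int)) (members : List (String × List (String × List (String × List (String × Int))))), Dom_get_stars leaderboard members → Pre_get_stars leaderboard members → Spec_get_stars leaderboard members (get_stars leaderboard members)

-- ===== LEMMAS AND PROOFS =====

-- abbreviations used only by the proofs
abbrev DP : Type := PySem.Dict String Int                      -- one day's progress / one day's counters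
abbrev MV : Type := PySem.Dict String (PySem.Dict String DP)   -- one member's record
abbrev SD : Type := PySem.Dict String DP                       -- the `stars` table

def zeroDay : DP := PySem.Dict.ofList [("gold", (0 : Int)), ("silver", 0)]

-- the per-member effect on one day's counters (common to both sides)
def mstep (day : String) (v : DP) (m : MV) : DP :=
  let dp := (m.getD "completion_day_level" PySem.Dict.empty).getD day PySem.Dict.empty
  if dp.contains "1" && dp.contains "2" then v.modify "gold" 0 (· + 1)
  else if dp.contains "1" then v.modify "silver" 0 (· + 1)
  else v

-- A's inner-loop body, on a member VALUE
def bodyA (day : String) (s : SD) (m : MV) : SD :=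
  let day_progress := (m.getD "completion_day_level" PySem.Dict.empty).getD day PySem.Dict.empty
  if day_progress.contains "1" && day_progress.contains "2" then
    s.modify day PySem.Dict.empty (fun d => d.modify "gold" 0 (· + 1))
  else if day_progress.contains "1" then
    s.modify day PySem.Dict.empty (fun d => d.modify "silver" 0 (· + 1))
  else s

def dayStepL (L : List MV) (s : SD) (d : Int) : SD :=
  L.foldl (bodyA (PySem.Int.toStr d)) (s.insert (PySem.Int.toStr d) zeroDay)

-- B's inner-loop body, on one (day, progress) item
def bodyB (s : SD) (p : String × DP) : SD :=
  if s.contains p.1 && p.2.contains "1" then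
    s.modify p.1 PySem.Dict.empty (fun d => d.modify (if p.2.contains "2" then "gold" else "silver") 0 (· + 1))
  else s

def memberB (s : SD) (m : MV) : SD :=
  ((m.getD "completion_day_level" PySem.Dict.empty).items).foldl bodyB s

lemma bodyA_getD (day : String) (s : SD) (m : MV) (k : String) :
    (bodyA day s m).getD k PySem.Dict.empty =
      if k = day then mstep day (s.getD day PySem.Dict.empty) m else s.getD k PySem.Dict.empty := by
  simp only [bodyA, mstep]
  by_cases hk : k = day
  · subst hk
    split_ifs with h1 h2 <;> simp_all [PySem.Dict.getD_modify]
  · split_ifs with h1 h2 <;> simp [PySem.Dict.getD_modify, hk]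

lemma bodyA_keys (day : String) (s : SD) (m : MV) (h : s.contains day = true) :
    (bodyA day s m).keys = s.keys := by
  simp only [bodyA]
  split_ifs <;>
    first
      | rw [PySem.Dict.keys_modify, PySem.Dict.keys_insert_of_contains _ _ h]
      | rfl

lemma foldA_getD (L : List MV) (day : String) (s : SD) (k : String) :
    (L.foldl (bodyA day) s).getD k PySem.Dict.empty =
      if k = day then L.foldl (mstep day) (s.getD day PySem.Dict.empty)
      else s.getD k PySem.Dict.empty := by
  induction L generalizing s with
  | nil => by_cases hk : k = day <;> simp [hk]
  | cons m L ih =>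
      simp only [List.foldl_cons]
      rw [ih]
      simp only [bodyA_getD]
      by_cases hk : k = day <;> simp [hk]

lemma foldA_keys (L : List MV) (day : String) (s : SD) (h : s.contains day = true) :
    (L.foldl (bodyA day) s).keys = s.keys := by
  induction L generalizing s h with
  | nil => rfl
  | cons m L ih =>
      simp only [List.foldl_cons]
      have hb := bodyA_keys day s m h
      have hc : (bodyA day s m).contains day = true := by
        rw [PySem.Dict.contains_iff_mem_keys] at h ⊢
        rw [hb]; exact h
      rw [ih _ hc, hb]

lemma bodyB_keys (s : SD) (p : String × DP) : (bodyB s p).keys = s.keys := by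
  simp only [bodyB]
  split_ifs with hb hb2 <;> try rfl
  all_goals
    rw [PySem.Dict.keys_modify,
      PySem.Dict.keys_insert_of_contains _ _ ((Bool.and_eq_true _ _).mp hb).1]

lemma bodyB_contains (s : SD) (p : String × DP) (k : String) :
    (bodyB s p).contains k = s.contains k := by
  rw [PySem.Dict.contains_eq_decide_mem_keys, PySem.Dict.contains_eq_decide_mem_keys,
    bodyB_keys]

lemma bodyB_getD_ne (s : SD) (p : String × DP) (k : String) (h : p.1 ≠ k) :
    (bodyB s p).getD k PySem.Dict.empty = s.getD k PySem.Dict.empty := by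
  simp only [bodyB]
  split_ifs with hb hb2 <;> try rfl
  all_goals (rw [PySem.Dict.getD_modify]; simp [Ne.symm h])

lemma foldB_getD_none (ps : List (String × DP)) (s : SD) (k : String)
    (h : ∀ p ∈ ps, p.1 ≠ k) :
    (ps.foldl bodyB s).getD k PySem.Dict.empty = s.getD k PySem.Dict.empty := by
  induction ps generalizing s with
  | nil => rfl
  | cons q ps ih =>
      simp only [List.foldl_cons]
      rw [ih _ (fun p hp => h p (List.mem_cons_of_mem q hp)),
        bodyB_getD_ne s q k (h q (List.mem_cons_self))]

lemma foldB_find (ps : List (String × DP)) (s : SD) (k : String)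
    (hnd : (ps.map Prod.fst).Nodup) :
    (ps.foldl bodyB s).getD k PySem.Dict.empty =
      match ps.find? (fun p => p.1 == k) with
      | none => s.getD k PySem.Dict.empty
      | some p =>
        if s.contains k && p.2.contains "1" then
          (s.getD k PySem.Dict.empty).modify (if p.2.contains "2" then "gold" else "silver") 0 (· + 1)
        else s.getD k PySem.Dict.empty := by
  induction ps generalizing s with
  | nil => rfl
  | cons q ps ih =>
      have hnd' : (ps.map Prod.fst).Nodup := (List.nodup_cons.mp hnd).2
      have hqmem : q.1 ∉ ps.map Prod.fst := (List.nodup_cons.mp hnd).1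
      simp only [List.foldl_cons]
      by_cases hq : q.1 = k
      · have hnone : ∀ p ∈ ps, p.1 ≠ k := by
          intro p hp hpk
          have : p.1 ∈ ps.map Prod.fst := List.mem_map_of_mem hp
          rw [hpk, ← hq] at this
          exact hqmem this
        rw [foldB_getD_none ps _ k hnone,
          List.find?_cons_of_pos (by simp [hq])]
        simp only [bodyB, hq]
        split_ifs with hb hb2 <;> try rfl
        all_goals (rw [PySem.Dict.getD_modify]; simp)
      · rw [List.find?_cons_of_neg (by simp [hq]), ih _ hnd']
        cases hfind : ps.find? (fun p => p.1 == k) with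
        | none => exact bodyB_getD_ne s q k hq
        | some p => rw [bodyB_contains, bodyB_getD_ne s q k hq]

lemma memberB_getD (s : SD) (m : MV) (k : String)
    (hnd : (m.getD "completion_day_level" PySem.Dict.empty).keys.Nodup) :
    (memberB s m).getD k PySem.Dict.empty =
      if s.contains k then mstep k (s.getD k PySem.Dict.empty) m
      else s.getD k PySem.Dict.empty := by
  have hnd' : (((m.getD "completion_day_level" PySem.Dict.empty).items).map Prod.fst).Nodup := by
    simpa [PySem.Dict.keys] using hnd
  unfold memberB
  rw [foldB_find _ _ _ hnd']
  cases hf : ((m.getD "completion_day_level" PySem.Dict.empty).items).find? (fun p => p.1 == k) with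
  | none =>
      have hget : (m.getD "completion_day_level" PySem.Dict.empty).get? k = none := by
        simp [PySem.Dict.get?, hf]
      have hdp : (m.getD "completion_day_level" PySem.Dict.empty).getD k PySem.Dict.empty = PySem.Dict.empty := by
        rw [PySem.Dict.getD_eq_get?_getD, hget]; rfl
      simp only [mstep, hdp, PySem.Dict.contains_empty]
      split_ifs <;> simp_all
  | some p =>
      have hpk : p.1 = k := by
        have := List.find?_some hf
        simpa using this
      have hget : (m.getD "completion_day_level" PySem.Dict.empty).get? k = some p.2 := by
        simp [PySem.Dict.get?, hf]
      have hdp : (m.getD "completion_day_level" PySem.Dict.empty).getD k PySem.Dict.empty = p.2 := by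
        rw [PySem.Dict.getD_eq_get?_getD, hget]; rfl
      simp only [mstep, hdp]
      by_cases hc : PySem.Dict.contains s k
      · by_cases h1 : p.2.contains "1"
        · by_cases h2 : p.2.contains "2" <;> simp [hc, h1, h2]
        · simp [hc, h1]
      · simp [hc]

lemma memberB_keys (s : SD) (m : MV) : (memberB s m).keys = s.keys := by
  unfold memberB
  generalize (m.getD "completion_day_level" PySem.Dict.empty).items = ps
  induction ps generalizing s with
  | nil => rfl
  | cons q ps ih => simp only [List.foldl_cons]; rw [ih, bodyB_keys]

lemma foldB_getD (L : List MV) (s : SD) (k : String)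
    (hnd : ∀ m ∈ L, (m.getD "completion_day_level" PySem.Dict.empty).keys.Nodup) :
    (L.foldl memberB s).getD k PySem.Dict.empty =
      if s.contains k then L.foldl (mstep k) (s.getD k PySem.Dict.empty)
      else s.getD k PySem.Dict.empty := by
  induction L generalizing s with
  | nil => by_cases hc : PySem.Dict.contains s k <;> simp [hc]
  | cons m L ih =>
      simp only [List.foldl_cons]
      rw [ih _ (fun m' hm' => hnd m' (List.mem_cons_of_mem m hm'))]
      have hck : (memberB s m).contains k = s.contains k := by
        rw [PySem.Dict.contains_eq_decide_mem_keys, PySem.Dict.contains_eq_decide_mem_keys,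
          memberB_keys]
      rw [hck, memberB_getD s m k (hnd m List.mem_cons_self)]
      by_cases hc : PySem.Dict.contains s k <;> simp [hc]

lemma foldB_keys (L : List MV) (s : SD) : (L.foldl memberB s).keys = s.keys := by
  induction L generalizing s with
  | nil => rfl
  | cons m L ih => simp only [List.foldl_cons]; rw [ih, memberB_keys]

lemma foldDays (L : List MV) (ds : List Int) (s : SD)
    (hnd : (ds.map PySem.Int.toStr).Nodup)
    (hfresh : ∀ d ∈ ds, s.contains (PySem.Int.toStr d) = false) :
    (ds.foldl (dayStepL L) s).keys = s.keys ++ ds.map PySem.Int.toStr ∧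
    ∀ k, (ds.foldl (dayStepL L) s).getD k PySem.Dict.empty =
      if k ∈ ds.map PySem.Int.toStr then L.foldl (mstep k) zeroDay
      else s.getD k PySem.Dict.empty := by
  induction ds generalizing s with
  | nil => exact ⟨by simp, fun k => by simp⟩
  | cons d ds ih =>
      rw [List.map_cons] at hnd
      have hnds : (ds.map PySem.Int.toStr).Nodup := (List.nodup_cons.mp hnd).2
      have hdmem : PySem.Int.toStr d ∉ ds.map PySem.Int.toStr := (List.nodup_cons.mp hnd).1
      have hfd : s.contains (PySem.Int.toStr d) = false := hfresh d List.mem_cons_self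
      have hkeysins : (s.insert (PySem.Int.toStr d) zeroDay).keys = s.keys ++ [PySem.Int.toStr d] :=
        PySem.Dict.keys_insert_of_not_contains _ _ hfd
      have hkeys1 : (dayStepL L s d).keys = s.keys ++ [PySem.Int.toStr d] := by
        unfold dayStepL
        rw [foldA_keys _ _ _ (PySem.Dict.contains_insert_self _ _ _), hkeysins]
      have hgetD1 : ∀ k, (dayStepL L s d).getD k PySem.Dict.empty =
          if k = PySem.Int.toStr d then L.foldl (mstep k) zeroDay
          else s.getD k PySem.Dict.empty := by
        intro k
        unfold dayStepL
        rw [foldA_getD]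
        by_cases hk : k = PySem.Int.toStr d
        · subst hk
          simp [PySem.Dict.getD_insert_self]
        · simp [hk, PySem.Dict.getD_insert]
      have hfresh1 : ∀ d' ∈ ds, (dayStepL L s d).contains (PySem.Int.toStr d') = false := by
        intro d' hd'
        rw [PySem.Dict.contains_eq_decide_mem_keys, hkeys1]
        have h1 : PySem.Int.toStr d' ∉ s.keys := by
          have := hfresh d' (List.mem_cons_of_mem d hd')
          rw [PySem.Dict.contains_eq_decide_mem_keys] at this
          simpa using this
        have h2 : PySem.Int.toStr d' ≠ PySem.Int.toStr d := by
          intro he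
          exact hdmem (he ▸ List.mem_map_of_mem hd')
        simp [h1, h2]
      obtain ⟨ihk, ihg⟩ := ih (dayStepL L s d) hnds hfresh1
      refine ⟨?_, ?_⟩
      · simp only [List.foldl_cons]
        rw [ihk, hkeys1]
        simp
      · intro k
        simp only [List.foldl_cons]
        rw [ihg k]
        by_cases hin : k ∈ ds.map PySem.Int.toStr
        · simp [hin]
        · rw [hgetD1 k]
          by_cases hk : k = PySem.Int.toStr d <;> simp [hk, hin]

lemma values_ofList_sub {κ ν : Type} [BEq κ] [LawfulBEq κ] (ps : List (κ × ν)) (w : ν)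
    (h : w ∈ (PySem.Dict.ofList ps).values) : w ∈ ps.map Prod.snd := by
  have key : ∀ (qs : List (κ × ν)) (d : PySem.Dict κ ν) (w : ν),
      w ∈ (qs.foldl (fun acc p => acc.insert p.1 p.2) d).values → w ∈ d.values ∨ w ∈ qs.map Prod.snd := by
    intro qs
    induction qs with
    | nil => intro d w hw; exact Or.inl hw
    | cons q qs ih =>
        intro d w hw
        rcases ih _ w hw with h | h
        · rcases PySem.Dict.mem_values_insert d q.1 q.2 w h with h' | h'
          · exact Or.inr (by simp [h'])
          · exact Or.inl h'
        · exact Or.inr (List.mem_cons_of_mem _ h)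
    
  rcases key ps PySem.Dict.empty w h with h' | h'
  · simp [PySem.Dict.values] at h'
    exact absurd h' (by simp [PySem.Dict.empty])
  · exact h' 

lemma members_nodup_cdl (members : List (String × List (String × List (String × List (String × Int)))))
    (m : MV) (h : m ∈ (pvMembersDict members).values) :
    (m.getD "completion_day_level" PySem.Dict.empty).keys.Nodup := by
  have hm := values_ofList_sub _ _ h
  rw [List.map_map] at hm
  obtain ⟨a, -, ha⟩ := List.mem_map.mp hm
  simp only [Function.comp] at ha
  cases hget : m.get? "completion_day_level" with
  | none =>
      rw [PySem.Dict.getD_eq_get?_getD, hget]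
      simp [PySem.Dict.keys_empty]
  | some v =>
      rw [PySem.Dict.getD_eq_get?_getD, hget, Option.getD_some]
      have hv : ("completion_day_level", v) ∈ m.items := PySem.Dict.mem_items_of_get?_eq_some _ hget
      have hvv : v ∈ m.values := by
        simp only [PySem.Dict.values]
        exact List.mem_map_of_mem hv
      rw [← ha] at hvv
      have hv2 := values_ofList_sub _ _ hvv
      rw [List.map_map] at hv2
      obtain ⟨q, -, hq⟩ := List.mem_map.mp hv2
      simp only [Function.comp] at hq
      rw [← hq]
      exact PySem.Dict.nodup_keys_ofList _

lemma dicts_eq (members : List (String × List (String × List (String × List (String × Int))))) :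
    (PySem.List.pyRange 1 (11 + 1) 1).foldl (dayStepL ((pvMembersDict members).values)) PySem.Dict.empty =
    ((pvMembersDict members).values).foldl memberB
      ((PySem.List.pyRange 1 (11 + 1) 1).foldl
        (fun d dayI => d.insert (PySem.Int.toStr dayI) zeroDay) PySem.Dict.empty) := by
  have hnd : ((PySem.List.pyRange 1 (11 + 1) 1).map PySem.Int.toStr).Nodup := by decide
  have hfresh : ∀ d ∈ PySem.List.pyRange 1 (11 + 1) 1,
      (PySem.Dict.empty : SD).contains (PySem.Int.toStr d) = false :=
    fun d _ => PySem.Dict.contains_empty _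
  obtain ⟨hAkeys, hAget⟩ :=
    foldDays ((pvMembersDict members).values) (PySem.List.pyRange 1 (11 + 1) 1) PySem.Dict.empty hnd hfresh
  rw [PySem.Dict.keys_empty, List.nil_append] at hAkeys
  have hitems0 : (((PySem.List.pyRange 1 (11 + 1) 1).foldl
      (fun d dayI => d.insert (PySem.Int.toStr dayI) zeroDay) PySem.Dict.empty) : SD).items
      = (PySem.List.pyRange 1 (11 + 1) 1).map (fun a => (PySem.Int.toStr a, zeroDay)) := by
    have := PySem.Dict.items_foldl_insert_fresh (PySem.List.pyRange 1 (11 + 1) 1)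
      (fun a => PySem.Int.toStr a) (fun _ => zeroDay) PySem.Dict.empty
      (fun a _ => PySem.Dict.contains_empty _) hnd
    simpa using this
  have hkeys0 : (((PySem.List.pyRange 1 (11 + 1) 1).foldl
      (fun d dayI => d.insert (PySem.Int.toStr dayI) zeroDay) PySem.Dict.empty) : SD).keys
      = (PySem.List.pyRange 1 (11 + 1) 1).map PySem.Int.toStr := by
    simp only [PySem.Dict.keys]
    rw [hitems0, List.map_map]
    simp [Function.comp]
  have hget0 : ∀ k ∈ (PySem.List.pyRange 1 (11 + 1) 1).map PySem.Int.toStr,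
      (((PySem.List.pyRange 1 (11 + 1) 1).foldl
        (fun d dayI => d.insert (PySem.Int.toStr dayI) zeroDay) PySem.Dict.empty) : SD).getD k PySem.Dict.empty = zeroDay := by
    intro k hk
    obtain ⟨a, ha, rfl⟩ := List.mem_map.mp hk
    exact PySem.Dict.getD_of_mem_items _ (hitems0 ▸ List.mem_map_of_mem ha) (by rw [hkeys0]; exact hnd) _
  have hnodcdl : ∀ m ∈ (pvMembersDict members).values,
      (m.getD "completion_day_level" PySem.Dict.empty).keys.Nodup :=
    fun m hm => members_nodup_cdl members m hm
  have hBkeys := foldB_keys ((pvMembersDict members).values)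
    (((PySem.List.pyRange 1 (11 + 1) 1).foldl
      (fun d dayI => d.insert (PySem.Int.toStr dayI) zeroDay) PySem.Dict.empty) : SD)
  apply PySem.Dict.ext
  rw [PySem.Dict.items_eq_map_keys _ (by rw [hAkeys]; simpa using hnd) PySem.Dict.empty,
    PySem.Dict.items_eq_map_keys _ (by rw [hBkeys, hkeys0]; exact hnd) PySem.Dict.empty,
    hAkeys, hBkeys, hkeys0]
  refine List.map_congr_left ?_
  intro k hk
  have hcont0 : (((PySem.List.pyRange 1 (11 + 1) 1).foldl
      (fun d dayI => d.insert (PySem.Int.toStr dayI) zeroDay) PySem.Dict.empty) : SD).contains k = true := by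
    rw [PySem.Dict.contains_eq_decide_mem_keys, hkeys0]
    simpa using hk
  rw [hAget k, foldB_getD _ _ _ hnodcdl, hcont0, hget0 k hk, if_pos hk]
  simp

-- ===== VERDICT (by name: the statement is the Claim_ definition above) =====
theorem get_stars_spec : Claim_equal_get_stars := by
  intro leaderboard members _ _
  show get_stars leaderboard members = get_stars_alt leaderboard members
  have hA : get_stars leaderboard members =
      ((PySem.List.pyRange 1 (11 + 1) 1).foldl (dayStepL ((pvMembersDict members).values))
        PySem.Dict.empty).items.map (fun p => (p.1, p.2.items)) := by
    have hfun : (fun (stars : SD) (dayI : Int) =>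
        ((pvMembersDict members).keys).foldl
          (fun s member => bodyA (PySem.Int.toStr dayI) s ((pvMembersDict members).getD member PySem.Dict.empty))
          (stars.insert (PySem.Int.toStr dayI) zeroDay))
        = dayStepL ((pvMembersDict members).values) := by
      funext stars dayI
      unfold dayStepL
      have hnod : (pvMembersDict members).keys.Nodup := by
        unfold pvMembersDict
        exact PySem.Dict.nodup_keys_ofList _
      rw [PySem.Dict.values_eq_map_keys (pvMembersDict members) hnod PySem.Dict.empty,
        List.foldl_map]
    show (((PySem.List.pyRange 1 (11 + 1) 1).foldl
        (fun (stars : SD) (dayI : Int) =>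
          ((pvMembersDict members).keys).foldl
            (fun s member => bodyA (PySem.Int.toStr dayI) s ((pvMembersDict members).getD member PySem.Dict.empty))
            (stars.insert (PySem.Int.toStr dayI) zeroDay))
        PySem.Dict.empty).items).map (fun p => (p.1, p.2.items)) = _
    rw [hfun]
  have hB : get_stars_alt leaderboard members =
      (((pvMembersDict members).values).foldl memberB
        ((PySem.List.pyRange 1 (11 + 1) 1).foldl
          (fun d dayI => d.insert (PySem.Int.toStr dayI) zeroDay) PySem.Dict.empty)).items.map
        (fun p => (p.1, p.2.items)) := rfl
  rw [hA, hB, dicts_eq]
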